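-- pv_equiv track=rewrite | github.com/SrMarinho/linkedin-rpa | src/core/use_cases/job_application_handler.py | _match_option
-- ===== SOURCE A (Python) =====
-- import unicodedata
--
-- def _match_option(answer: str, options: list[str]) -> str | None:
--     """Find the best matching option for a given answer string."""
--     def normalize(s: str) -> str:
--         s = unicodedata.normalize("NFKD", s).encode("ascii", "ignore").decode()
--         return s.lower().strip()
--
--     answer_n = normalize(answer)
--
--     # 1. Exact match (normalized)
--     for opt in options:
--         if normalize(opt) == answer_n:
--             return opt
--
--     # 2. Answer contains option or option contains answer
--     for opt in options:
--         opt_n = normalize(opt)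
--         if answer_n in opt_n or opt_n in answer_n:
--             return opt
--
--     # 3. Any word from answer matches any word in option
--     answer_words = set(answer_n.split())
--     for opt in options:
--         opt_words = set(normalize(opt).split())
--         if answer_words & opt_words:
--             return opt
--
--     return None
-- ===== SOURCE B (Python) =====
-- import unicodedata
--
-- def _match_option(answer, options):
--     def normalize(s):
--         s = unicodedata.normalize("NFKD", s).encode("ascii", "ignore").decode()
--         return s.lower().strip()
--
--     answer_n = normalize(answer)
--     answer_words = set(answer_n.split())
--
--     def rank(opt_n):
--         if opt_n == answer_n:
--             return 0
--         if answer_n in opt_n or opt_n in answer_n: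
--             return 1
--         if answer_words & set(opt_n.split()):
--             return 2
--         return 3
--
--     ranks = [rank(normalize(opt)) for opt in options]
--     best = min(ranks, default=3)
--     if best == 3:
--         return None
--     return options[ranks.index(best)]
-- ===== Notes on version B (the rewrite author's own statement) =====
-- stated objective: alternative
-- what changed: Replaces A's three ordered short-circuit scans (exact match, containment, word overlap) by a single pass that assigns each normalized option a priority rank 0-3, then selects the earliest option of minimal rank via min and index.
import Mathlib
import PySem

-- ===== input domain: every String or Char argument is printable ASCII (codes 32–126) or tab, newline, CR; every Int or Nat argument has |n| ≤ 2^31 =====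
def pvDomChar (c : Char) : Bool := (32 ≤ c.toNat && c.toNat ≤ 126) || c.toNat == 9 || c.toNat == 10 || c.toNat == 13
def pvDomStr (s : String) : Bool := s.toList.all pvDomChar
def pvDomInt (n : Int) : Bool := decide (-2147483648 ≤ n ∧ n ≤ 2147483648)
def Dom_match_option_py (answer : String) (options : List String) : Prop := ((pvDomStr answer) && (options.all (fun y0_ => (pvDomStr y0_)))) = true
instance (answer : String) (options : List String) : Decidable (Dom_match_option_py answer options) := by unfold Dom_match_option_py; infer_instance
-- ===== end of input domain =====

-- B replaces A's three ordered scan loops by one rank per option plus a single min/index selection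
-- (objective: alternative decomposition, same cost; A=B proved on the full ASCII domain).

-- ===== PORT A =====
-- normalize(s): on the printable-ASCII domain, unicodedata NFKD + ascii encode/decode is
-- the identity, so normalize(s) = s.lower().strip() exactly.
def pvNormalize (s : String) : String := PySem.Str.strip (PySem.Str.lower s)

-- "for opt in options: if normalize(opt) == answer_n: return opt"
def pvLoop1 (answer_n : String) : List String → Option String
  | [] => none
  | opt :: rest =>
    if pvNormalize opt == answer_n then some opt else pvLoop1 answer_n rest

-- "for opt in options: opt_n = normalize(opt); if answer_n in opt_n or opt_n in answer_n: return opt"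
def pvLoop2 (answer_n : String) : List String → Option String
  | [] => none
  | opt :: rest =>
    let opt_n := pvNormalize opt
    if PySem.Str.isIn answer_n opt_n || PySem.Str.isIn opt_n answer_n then some opt
    else pvLoop2 answer_n rest

-- "for opt in options: opt_words = set(normalize(opt).split()); if answer_words & opt_words: return opt"
def pvLoop3 (answer_words : PySem.Set String) : List String → Option String
  | [] => none
  | opt :: rest =>
    let opt_words := PySem.Set.ofList (PySem.Str.split₀ (pvNormalize opt))
    if !(PySem.Set.inter answer_words opt_words).isEmpty then some opt
    else pvLoop3 answer_words rest

def match_option_py (answer : String) (options : List String) : Option String :=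
  let answer_n := pvNormalize answer
  match pvLoop1 answer_n options with
  | some o => some o
  | none =>
    match pvLoop2 answer_n options with
    | some o => some o
    | none =>
      let answer_words := PySem.Set.ofList (PySem.Str.split₀ answer_n)
      pvLoop3 answer_words options

-- ===== PORT B =====
-- rank(opt_n): 0 exact, 1 containment, 2 word overlap, 3 no match (B's helper)
def pvRank (answer_n : String) (answer_words : PySem.Set String) (opt_n : String) : Nat :=
  if opt_n == answer_n then 0
  else if PySem.Str.isIn answer_n opt_n || PySem.Str.isIn opt_n answer_n then 1
  else if !(PySem.Set.inter answer_words (PySem.Set.ofList (PySem.Str.split₀ opt_n))).isEmpty then 2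
  else 3

def match_option_py_alt (answer : String) (options : List String) : Option String :=
  let answer_n := pvNormalize answer
  let answer_words := PySem.Set.ofList (PySem.Str.split₀ answer_n)
  let ranks := options.map (fun opt => pvRank answer_n answer_words (pvNormalize opt))
  let best := (PySem.List.min? ranks id).getD 3
  if best == 3 then none
  else
    match PySem.List.index? ranks best with
    | some i => PySem.List.pyGet? options (i : Int)
    | none => none

-- ===== PRECONDITION & SPEC =====
def Spec_match_option_py (answer : String) (options : List String) (out : Option String) : Prop := out = match_option_py_alt answer options
instance (answer : String) (options : List String) (out : Option String) : Decidable (Spec_match_option_py answer options out) := by unfold Spec_match_option_py; infer_instance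

-- ===== CLAIM (what is proved, stated in full; the proofs are below) =====
def Claim_equal_match_option_py : Prop := ∀ (answer : String) (options : List String), Dom_match_option_py answer options → Spec_match_option_py answer options (match_option_py answer options)

-- ===== LEMMAS AND PROOFS =====

theorem pvRank_le_three (n : String) (W : PySem.Set String) (m : String) : pvRank n W m ≤ 3 := by
  unfold pvRank; split_ifs <;> omega

-- an exact match is also a containment (s in s is always true)
theorem pvC0_imp_c1 {n m : String} (h : (m == n) = true) :
    (PySem.Str.isIn n m || PySem.Str.isIn m n) = true := by
  have hm : m = n := by simpa using h
  subst hm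
  simp [PySem.Chars.isIn_iff_infix]

-- A's loop-1 test equals "rank is 0"
theorem pvCond1_eq (n : String) (W : PySem.Set String) (m : String) :
    (m == n) = (pvRank n W m == 0) := by
  unfold pvRank
  split_ifs with h <;> simp_all

-- A's loop-2 test equals "rank ≤ 1"
theorem pvCond2_eq (n : String) (W : PySem.Set String) (m : String) :
    (PySem.Str.isIn n m || PySem.Str.isIn m n) = decide (pvRank n W m ≤ 1) := by
  by_cases h0 : (m == n) = true
  · unfold pvRank
    rw [if_pos h0, pvC0_imp_c1 h0]
    rfl
  · unfold pvRank
    rw [if_neg h0]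
    by_cases h1 : (PySem.Str.isIn n m || PySem.Str.isIn m n) = true
    · rw [if_pos h1, h1]
      rfl
    · simp only [Bool.not_eq_true] at h1
      rw [h1, if_neg (by simp)]
      split_ifs <;> rfl

-- when the first two tiers fail, A's loop-3 test equals "rank is 2"
theorem pvCond3_eq (n : String) (W : PySem.Set String) (m : String)
    (h : ¬ pvRank n W m ≤ 1) :
    (!(PySem.Set.inter W (PySem.Set.ofList (PySem.Str.split₀ m))).isEmpty) = (pvRank n W m == 2) := by
  unfold pvRank at h ⊢
  by_cases h0 : (m == n) = true
  · rw [if_pos h0] at h; omega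
  · rw [if_neg h0] at h ⊢
    by_cases h1 : (PySem.Str.isIn n m || PySem.Str.isIn m n) = true
    · rw [if_pos h1] at h; omega
    · rw [if_neg h1] at h ⊢
      by_cases h2 : (!(PySem.Set.inter W (PySem.Set.ofList (PySem.Str.split₀ m))).isEmpty) = true
      · rw [h2]; simp
      · simp only [Bool.not_eq_true] at h2
        rw [h2]; simp

theorem pvLoop1_eq (n : String) (W : PySem.Set String) (l : List String) :
    pvLoop1 n l = l.find? (fun o => pvRank n W (pvNormalize o) == 0) := by
  induction l with
  | nil => rfl
  | cons o rest ih =>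
    simp only [pvLoop1]
    rw [pvCond1_eq n W (pvNormalize o)]
    cases h : (pvRank n W (pvNormalize o) == 0) <;>
      simp [List.find?_cons, h, ih]

theorem pvLoop2_eq (n : String) (W : PySem.Set String) (l : List String) :
    pvLoop2 n l = l.find? (fun o => decide (pvRank n W (pvNormalize o) ≤ 1)) := by
  induction l with
  | nil => rfl
  | cons o rest ih =>
    simp only [pvLoop2]
    rw [pvCond2_eq n W (pvNormalize o)]
    cases h : (decide (pvRank n W (pvNormalize o) ≤ 1)) <;>
      simp [List.find?_cons, h, ih]

theorem pvLoop3_eq (W : PySem.Set String) (l : List String) :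
    pvLoop3 W l =
      l.find? (fun o =>
        !(PySem.Set.inter W (PySem.Set.ofList (PySem.Str.split₀ (pvNormalize o)))).isEmpty) := by
  induction l with
  | nil => rfl
  | cons o rest ih =>
    simp only [pvLoop3]
    cases h : (!(PySem.Set.inter W (PySem.Set.ofList (PySem.Str.split₀ (pvNormalize o)))).isEmpty) <;>
      simp [List.find?_cons, h, ih]

theorem pvFind?_congr {α : Type} (p q : α → Bool) (l : List α)
    (h : ∀ x ∈ l, p x = q x) : l.find? p = l.find? q := by
  induction l with
  | nil => rfl
  | cons a rest ih =>
    have ha := h a (List.mem_cons_self ..)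
    simp only [List.find?_cons, ← ha]
    cases hp : p a <;>
      simp [hp, ih (fun x hx => h x (List.mem_cons_of_mem _ hx))]

-- B's index?/pyGet? selection is "first element whose rank equals k"
theorem pvSel_core (r : String → Nat) (k : Nat) (l : List String) :
    (match PySem.List.index? (l.map r) k with
     | some i => PySem.List.pyGet? l (i : Int)
     | none => none) = l.find? (fun o => r o == k) := by
  induction l with
  | nil => rfl
  | cons o rest ih =>
    simp only [PySem.List.index?, List.map_cons, List.idxOf?_cons] at *
    cases h : (r o == k) with
    | true =>
      simp [List.find?_cons, h, PySem.List.pyGet?_natCast]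
    | false =>
      simp only [List.find?_cons, h]
      rw [if_neg (by simp : ¬(false = true))]
      rcases hi : List.idxOf? k (rest.map r) with _ | i
      · rw [hi] at ih; simpa using ih
      · rw [hi] at ih
        simp only [Option.map_some]
        simpa [PySem.List.pyGet?_natCast, List.getElem?_cons_succ] using ih

set_option maxHeartbeats 1000000 in
theorem pvMain_core (n : String) (W : PySem.Set String) (options : List String) :
    (match options.find? (fun o => pvRank n W (pvNormalize o) == 0) with
     | some o => some o
     | none =>
       match options.find? (fun o => decide (pvRank n W (pvNormalize o) ≤ 1)) with
       | some o => some o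
       | none => options.find? (fun o =>
           !(PySem.Set.inter W (PySem.Set.ofList (PySem.Str.split₀ (pvNormalize o)))).isEmpty)) =
    (if ((PySem.List.min? (options.map (fun opt => pvRank n W (pvNormalize opt))) id).getD 3) == 3
     then none
     else options.find? (fun o => pvRank n W (pvNormalize o) ==
            ((PySem.List.min? (options.map (fun opt => pvRank n W (pvNormalize opt))) id).getD 3))) := by
  set best := (PySem.List.min? (options.map (fun opt => pvRank n W (pvNormalize opt))) id).getD 3
    with hbest
  clear_value best
  have hmin_le : ∀ o ∈ options, best ≤ pvRank n W (pvNormalize o) := by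
    intro o ho
    rcases hm : PySem.List.min? (options.map (fun opt => pvRank n W (pvNormalize opt))) id
      with _ | b
    · rw [PySem.List.min?_eq_none_iff] at hm
      simp only [List.map_eq_nil_iff] at hm
      subst hm
      exact absurd ho (List.not_mem_nil)
    · have hmemr : pvRank n W (pvNormalize o) ∈
          options.map (fun opt => pvRank n W (pvNormalize opt)) := List.mem_map_of_mem ho
      have hlt := PySem.List.min?_isMin hm _ hmemr
      have hb : best = b := by rw [hbest, hm]; rfl
      rw [hb]; simpa using hlt
  have hmem : best ≠ 3 → ∃ o ∈ options, pvRank n W (pvNormalize o) = best := by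
    intro hne
    rcases hm : PySem.List.min? (options.map (fun opt => pvRank n W (pvNormalize opt))) id
      with _ | b
    · exact absurd (by rw [hbest, hm]; rfl) hne
    · have hb : best = b := by rw [hbest, hm]; rfl
      obtain ⟨o, ho, hro⟩ := List.mem_map.1 (PySem.List.min?_mem hm)
      exact ⟨o, ho, by rw [hb]; exact hro⟩
  have hle3 : best ≤ 3 := by
    rcases hm : PySem.List.min? (options.map (fun opt => pvRank n W (pvNormalize opt))) id
      with _ | b
    · rw [hbest, hm]; simp
    · have hb : best = b := by rw [hbest, hm]; rfl
      obtain ⟨o, ho, hro⟩ := List.mem_map.1 (PySem.List.min?_mem hm)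
      rw [hb, ← hro]
      exact pvRank_le_three n W (pvNormalize o)
  rcases (by omega : best = 0 ∨ best = 1 ∨ best = 2 ∨ best = 3) with h | h | h | h <;>
    rw [h] at hmin_le hmem ⊢
  · -- best = 0: loop 1 fires on the first rank-0 option, which is B's selection
    obtain ⟨x, hx, hrx⟩ := hmem (by omega)
    have hs : (options.find? (fun o => pvRank n W (pvNormalize o) == 0)).isSome :=
      List.find?_isSome.2 ⟨x, hx, by simp [hrx]⟩
    obtain ⟨y, hy⟩ := Option.isSome_iff_exists.1 hs
    rw [hy]
    simp
  · -- best = 1: no rank-0 option, loop 2 fires on the first rank-1 option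
    have h0none : options.find? (fun o => pvRank n W (pvNormalize o) == 0) = none :=
      List.find?_eq_none.2 fun x' hx' => by
        have := hmin_le x' hx'
        simp only [beq_iff_eq]
        omega
    have hcg : options.find? (fun o => decide (pvRank n W (pvNormalize o) ≤ 1)) =
        options.find? (fun o => pvRank n W (pvNormalize o) == 1) :=
      pvFind?_congr _ _ _ fun x' hx' => by
        have := hmin_le x' hx'
        by_cases hq : pvRank n W (pvNormalize x') = 1
        · simp [hq]
        · have hq2 : ¬ pvRank n W (pvNormalize x') ≤ 1 := by omega
          simp [hq, hq2]
    obtain ⟨x, hx, hrx⟩ := hmem (by omega)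
    have hs : (options.find? (fun o => pvRank n W (pvNormalize o) == 1)).isSome :=
      List.find?_isSome.2 ⟨x, hx, by simp [hrx]⟩
    obtain ⟨y, hy⟩ := Option.isSome_iff_exists.1 hs
    rw [h0none, hcg, hy]
    simp
  · -- best = 2: tiers 1–2 empty, loop 3 fires on the first rank-2 option
    have h0none : options.find? (fun o => pvRank n W (pvNormalize o) == 0) = none :=
      List.find?_eq_none.2 fun x' hx' => by
        have := hmin_le x' hx'
        simp only [beq_iff_eq]
        omega
    have h1none : options.find? (fun o => decide (pvRank n W (pvNormalize o) ≤ 1)) = none :=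
      List.find?_eq_none.2 fun x' hx' => by
        have := hmin_le x' hx'
        simp only [decide_eq_true_eq]
        omega
    have hcg : options.find? (fun o =>
          !(PySem.Set.inter W (PySem.Set.ofList (PySem.Str.split₀ (pvNormalize o)))).isEmpty) =
        options.find? (fun o => pvRank n W (pvNormalize o) == 2) :=
      pvFind?_congr _ _ _ fun x' hx' => by
        have := hmin_le x' hx'
        exact pvCond3_eq n W (pvNormalize x') (by omega)
    obtain ⟨x, hx, hrx⟩ := hmem (by omega)
    have hs : (options.find? (fun o => pvRank n W (pvNormalize o) == 2)).isSome :=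
      List.find?_isSome.2 ⟨x, hx, by simp [hrx]⟩
    obtain ⟨y, hy⟩ := Option.isSome_iff_exists.1 hs
    rw [h0none, h1none, hcg, hy]
    simp
  · -- best = 3: nothing matches anywhere; both return none
    have hall : ∀ x ∈ options, pvRank n W (pvNormalize x) = 3 := fun x hx => by
      have h1 := hmin_le x hx
      have h2 := pvRank_le_three n W (pvNormalize x)
      omega
    have h0none : options.find? (fun o => pvRank n W (pvNormalize o) == 0) = none :=
      List.find?_eq_none.2 fun x' hx' => by
        have := hall x' hx'
        simp only [beq_iff_eq]
        omega
    have h1none : options.find? (fun o => decide (pvRank n W (pvNormalize o) ≤ 1)) = none :=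
      List.find?_eq_none.2 fun x' hx' => by
        have := hall x' hx'
        simp only [decide_eq_true_eq]
        omega
    have h2none : options.find? (fun o =>
          !(PySem.Set.inter W (PySem.Set.ofList (PySem.Str.split₀ (pvNormalize o)))).isEmpty)
        = none :=
      List.find?_eq_none.2 fun x' hx' => by
        have h3x := hall x' hx'
        rw [pvCond3_eq n W (pvNormalize x') (by omega)]
        simp [h3x]
    rw [h0none, h1none, h2none]
    simp

theorem pvMain (answer : String) (options : List String) :
    match_option_py answer options = match_option_py_alt answer options := by
  simp only [match_option_py, match_option_py_alt]
  rw [pvLoop1_eq (pvNormalize answer)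
        (PySem.Set.ofList (PySem.Str.split₀ (pvNormalize answer))),
      pvLoop2_eq (pvNormalize answer)
        (PySem.Set.ofList (PySem.Str.split₀ (pvNormalize answer))),
      pvLoop3_eq, pvSel_core]
  exact pvMain_core (pvNormalize answer)
    (PySem.Set.ofList (PySem.Str.split₀ (pvNormalize answer))) options

-- ===== VERDICT (by name: the statement is the Claim_ definition above) =====
theorem match_option_py_spec : Claim_equal_match_option_py := by
  intro answer options _
  unfold Spec_match_option_py
  exact pvMain answer options
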